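-- pv_equiv track=rewrite | github.com/rafamdr/coding_chanllenges | contained_items/main.py | contained_items_v2
-- ===== SOURCE A (Python) =====
-- from typing import List, Dict
--
-- def contained_items_v2(text: str, indices: List[tuple[int, int]]) -> Dict[tuple[int, int], int]:
--     COUNT, LOCAL_COUNT, STATE = 0, 1, 2
--     indices_dict, result_dict = {}, {}
--     for (start, end) in indices:
--         if start not in indices_dict:
--             indices_dict[start] = {}
--         indices_dict[start][end] = [0, 0, 0]
--
--     for i, ch in enumerate(text):
--         for start in indices_dict:
--             if i >= start:
--                 for end in indices_dict[start]:
--                     if i < end: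
--                         if ch == '|':
--                             indices_dict[start][end][COUNT] += indices_dict[start][end][LOCAL_COUNT]
--                             indices_dict[start][end][LOCAL_COUNT] = 0
--                             indices_dict[start][end][STATE] = 1
--                         else:
--                             indices_dict[start][end][LOCAL_COUNT] += indices_dict[start][end][STATE]
--
--     for start in indices_dict:
--         for end in indices_dict[start]:
--             result_dict[(start, end)] = indices_dict[start][end][COUNT]
--
--     return result_dict
-- ===== SOURCE B (Python) =====
-- from typing import List, Dict
--
-- def _lower_bound(a, x):
--     lo, hi = 0, len(a)
--     while lo < hi:
--         mid = (lo + hi) // 2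
--         if a[mid] < x:
--             lo = mid + 1
--         else:
--             hi = mid
--     return lo
--
-- def contained_items_v2(text: str, indices: List[tuple[int, int]]) -> Dict[tuple[int, int], int]:
--     bars = [i for i, ch in enumerate(text) if ch == '|']
--     groups = {}
--     for start, end in indices:
--         groups.setdefault(start, {})[end] = None
--     result = {}
--     for start, ends in groups.items():
--         lo = _lower_bound(bars, start)
--         for end in ends:
--             hi = _lower_bound(bars, end) - 1
--             result[(start, end)] = (bars[hi] - bars[lo]) - (hi - lo) if lo < hi else 0
--     return result
-- ===== Notes on version B (the rewrite author's own statement) =====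
-- stated objective: faster
-- what changed: A sweeps every character of the text once per stored interval, keeping a [count, local, state] cell per (start, end) pair; B scans the text once to collect the positions of the '|' bars and answers each interval with a hand-written binary search over that sorted list plus the closed-form count bars[hi]-bars[lo]-(hi-lo).
import Mathlib
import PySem

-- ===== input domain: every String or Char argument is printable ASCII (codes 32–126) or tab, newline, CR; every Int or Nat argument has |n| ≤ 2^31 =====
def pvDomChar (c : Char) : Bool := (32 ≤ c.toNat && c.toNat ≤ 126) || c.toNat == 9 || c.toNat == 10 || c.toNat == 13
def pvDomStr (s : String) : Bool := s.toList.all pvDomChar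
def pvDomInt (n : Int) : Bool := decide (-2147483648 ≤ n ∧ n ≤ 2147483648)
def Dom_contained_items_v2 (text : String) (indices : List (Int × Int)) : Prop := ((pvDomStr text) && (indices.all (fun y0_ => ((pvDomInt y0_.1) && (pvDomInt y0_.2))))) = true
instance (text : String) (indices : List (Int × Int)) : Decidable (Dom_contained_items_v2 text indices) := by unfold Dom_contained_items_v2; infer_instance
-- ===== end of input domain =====

-- B replaces A's per-character sweep over every stored interval (O(len(text)·#intervals))
-- by one scan collecting bar positions plus a hand-written binary search per interval
-- (O(len(text) + #intervals·log #bars)); equivalence of the returned association list is proved.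

-- ===== PORT A =====
-- the loop body applied to one [COUNT, LOCAL_COUNT, STATE] cell for character ch
def pvStepC (ch : Char) (v : Int × Int × Int) : Int × Int × Int :=
  if ch = '|' then (v.1 + v.2.1, 0, 1) else (v.1, v.2.1 + v.2.2, v.2.2)

-- 'if start not in indices_dict: indices_dict[start] = {}' followed by
-- 'indices_dict[start][end] = [0, 0, 0]' is exactly Dict.modify with default {}
def pvBuildA (indices : List (Int × Int)) : PySem.Dict Int (PySem.Dict Int (Int × Int × Int)) :=
  indices.foldl
    (fun d p => d.modify p.1 PySem.Dict.empty (fun g => g.insert p.2 ((0, 0, 0) : Int × Int × Int)))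
    PySem.Dict.empty

-- one iteration of 'for i, ch in enumerate(text)': Python iterates the keys and
-- mutates the stored cells in place, i.e. maps every value, keys untouched
def pvStepA (d : PySem.Dict Int (PySem.Dict Int (Int × Int × Int))) (p : Int × Char) :
    PySem.Dict Int (PySem.Dict Int (Int × Int × Int)) :=
  PySem.Dict.mk (d.items.map (fun q =>
    (q.1, if q.1 ≤ p.1 then
            PySem.Dict.mk (q.2.items.map (fun r =>
              (r.1, if p.1 < r.1 then pvStepC p.2 r.2 else r.2)))
          else q.2)))

def contained_items_v2 (text : String) (indices : List (Int × Int)) : List (Int × Int × Int) :=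
  let dfinal := (PySem.List.enumerate text.toList 0).foldl pvStepA (pvBuildA indices)
  let result : PySem.Dict (Int × Int) Int :=
    dfinal.items.foldl
      (fun r q => q.2.items.foldl (fun r p => r.insert (q.1, p.1) p.2.1) r)
      PySem.Dict.empty
  result.items.map (fun p => (p.1.1, p.1.2, p.2))

-- ===== PORT B =====
-- _lower_bound(a, x): the while loop as well-founded recursion on hi - lo;
-- a[mid] is in range whenever called (0 ≤ lo ≤ mid < hi ≤ len a), ported via pyGetD
def pvLBgo (a : List Int) (x : Int) (lo hi : Nat) : Nat :=
  if _h : lo < hi then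
    let mid := (lo + hi) / 2
    if PySem.List.pyGetD a (mid : Int) 0 < x then pvLBgo a x (mid + 1) hi
    else pvLBgo a x lo mid
  else lo
termination_by hi - lo
decreasing_by all_goals omega

def pvLowerBound (a : List Int) (x : Int) : Int := (pvLBgo a x 0 a.length : Int)

-- 'groups.setdefault(start, {})[end] = None' is Dict.modify with default {}
def pvBuildB (indices : List (Int × Int)) : PySem.Dict Int (PySem.Dict Int Unit) :=
  indices.foldl
    (fun d p => d.modify p.1 PySem.Dict.empty (fun g => g.insert p.2 ()))
    PySem.Dict.empty

def contained_items_v2_alt (text : String) (indices : List (Int × Int)) : List (Int × Int × Int) :=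
  let bars : List Int :=
    ((PySem.List.enumerate text.toList 0).filter (fun p => p.2 == '|')).map (fun p => p.1)
  let groups := pvBuildB indices
  let result : PySem.Dict (Int × Int) Int :=
    groups.items.foldl
      (fun r q =>
        let lo := pvLowerBound bars q.1
        q.2.items.foldl
          (fun r p =>
            let hi := pvLowerBound bars p.1 - 1
            r.insert (q.1, p.1)
              (if lo < hi then (PySem.List.pyGetD bars hi 0 - PySem.List.pyGetD bars lo 0) - (hi - lo)
               else 0)) r)
      PySem.Dict.empty
  result.items.map (fun p => (p.1.1, p.1.2, p.2))

-- ===== PRECONDITION & SPEC =====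
def Spec_contained_items_v2 (text : String) (indices : List (Int × Int)) (out : List (Int × Int × Int)) : Prop := out = contained_items_v2_alt text indices
instance (text : String) (indices : List (Int × Int)) (out : List (Int × Int × Int)) : Decidable (Spec_contained_items_v2 text indices out) := by unfold Spec_contained_items_v2; infer_instance

-- ===== CLAIM (what is proved, stated in full; the proofs are below) =====
def Claim_equal_contained_items_v2 : Prop := ∀ (text : String) (indices : List (Int × Int)), Dom_contained_items_v2 text indices → Spec_contained_items_v2 text indices (contained_items_v2 text indices)

-- ===== LEMMAS AND PROOFS =====

theorem pv_foldl_mkmap {κ ν ι : Type} (f : ι → κ → ν → ν) (L : List ι) (d : PySem.Dict κ ν) :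
    (L.foldl (fun d p => PySem.Dict.mk (d.items.map (fun q => (q.1, f p q.1 q.2)))) d)
      = PySem.Dict.mk (d.items.map (fun q => (q.1, L.foldl (fun v p => f p q.1 v) q.2))) := by
  induction L generalizing d with
  | nil => simp
  | cons p L ih =>
    rw [List.foldl_cons, ih]
    simp [List.map_map, Function.comp]

theorem pvStepA_eq (d : PySem.Dict Int (PySem.Dict Int (Int × Int × Int))) (p : Int × Char) :
    pvStepA d p = PySem.Dict.mk (d.items.map (fun q =>
      (q.1, PySem.Dict.mk (q.2.items.map (fun r =>
        (r.1, if q.1 ≤ p.1 ∧ p.1 < r.1 then pvStepC p.2 r.2 else r.2)))))) := by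
  unfold pvStepA
  congr 1
  apply List.map_congr_left
  intro q _
  by_cases h : q.1 ≤ p.1 <;> simp [h]

theorem pv_dfinal (E : List (Int × Char)) (d0 : PySem.Dict Int (PySem.Dict Int (Int × Int × Int))) :
    E.foldl pvStepA d0 = PySem.Dict.mk (d0.items.map (fun q =>
      (q.1, PySem.Dict.mk (q.2.items.map (fun r =>
        (r.1, E.foldl (fun v p => if q.1 ≤ p.1 ∧ p.1 < r.1 then pvStepC p.2 v else v) r.2)))))) := by
  have h1 : pvStepA = fun d p => PySem.Dict.mk (d.items.map (fun q =>
      (q.1, PySem.Dict.mk (q.2.items.map (fun r =>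
        (r.1, if q.1 ≤ p.1 ∧ p.1 < r.1 then pvStepC p.2 r.2 else r.2)))))) := by
    funext d p; exact pvStepA_eq d p
  rw [h1]
  have h2 := pv_foldl_mkmap (f := fun (p : Int × Char) (s : Int) (inner : PySem.Dict Int (Int × Int × Int)) =>
    PySem.Dict.mk (inner.items.map (fun r =>
      (r.1, if s ≤ p.1 ∧ p.1 < r.1 then pvStepC p.2 r.2 else r.2)))) E d0
  refine h2.trans ?_
  congr 1
  apply List.map_congr_left
  intro q _
  congr 1
  exact pv_foldl_mkmap (f := fun (p : Int × Char) (e : Int) (v : Int × Int × Int) =>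
    if q.1 ≤ p.1 ∧ p.1 < e then pvStepC p.2 v else v) E q.2

def pvConvI (g : PySem.Dict Int Unit) : PySem.Dict Int (Int × Int × Int) :=
  PySem.Dict.mk (g.items.map (fun r => (r.1, ((0, 0, 0) : Int × Int × Int))))

def pvConv (d : PySem.Dict Int (PySem.Dict Int Unit)) : PySem.Dict Int (PySem.Dict Int (Int × Int × Int)) :=
  PySem.Dict.mk (d.items.map (fun q => (q.1, pvConvI q.2)))

theorem pvConvI_insert (g : PySem.Dict Int Unit) (e : Int) :
    pvConvI (g.insert e ()) = (pvConvI g).insert e ((0, 0, 0) : Int × Int × Int) := by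
  have hc : (pvConvI g).contains e = g.contains e := by
    simp [pvConvI, PySem.Dict.contains, List.any_map, Function.comp_def]
  unfold PySem.Dict.insert
  rw [hc]
  by_cases h : g.contains e
  · simp only [h, if_true]
    simp [pvConvI, List.map_map, Function.comp_def]
    intro a b _
    by_cases h2 : a = e <;> simp [h2]
  · simp only [h, if_false]
    simp [pvConvI]

theorem pvConv_contains (d : PySem.Dict Int (PySem.Dict Int Unit)) (s : Int) :
    (pvConv d).contains s = d.contains s := by
  simp [pvConv, PySem.Dict.contains, List.any_map, Function.comp_def]

theorem pvConv_get? (d : PySem.Dict Int (PySem.Dict Int Unit)) (s : Int) :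
    (pvConv d).get? s = (d.get? s).map pvConvI := by
  simp [pvConv, PySem.Dict.get?, List.find?_map, Function.comp_def, Option.map_map]

theorem pvConv_insert (d : PySem.Dict Int (PySem.Dict Int Unit)) (s : Int) (g : PySem.Dict Int Unit) :
    (pvConv d).insert s (pvConvI g) = pvConv (d.insert s g) := by
  unfold PySem.Dict.insert
  rw [pvConv_contains]
  by_cases h : d.contains s
  · simp only [h, if_true]
    unfold pvConv
    simp [List.map_map, Function.comp_def]
    intro a b _
    by_cases h2 : a = s <;> simp [h2]
  · simp only [h, if_false]
    unfold pvConv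
    simp

theorem pvConv_modify (d : PySem.Dict Int (PySem.Dict Int Unit)) (s e : Int) :
    (pvConv d).modify s PySem.Dict.empty (fun g => g.insert e ((0, 0, 0) : Int × Int × Int))
      = pvConv (d.modify s PySem.Dict.empty (fun g => g.insert e ())) := by
  unfold PySem.Dict.modify PySem.Dict.getD
  beta_reduce
  rw [pvConv_get?]
  have h3 : ((d.get? s).map pvConvI).getD PySem.Dict.empty = pvConvI ((d.get? s).getD PySem.Dict.empty) := by
    cases d.get? s <;> rfl
  rw [h3, ← pvConvI_insert, pvConv_insert]

theorem pvBuildA_eq (indices : List (Int × Int)) : pvBuildA indices = pvConv (pvBuildB indices) := by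
  unfold pvBuildA pvBuildB
  have h : ∀ (l : List (Int × Int)) (d : PySem.Dict Int (PySem.Dict Int Unit)),
      l.foldl (fun d p => d.modify p.1 PySem.Dict.empty
          (fun g => g.insert p.2 ((0, 0, 0) : Int × Int × Int))) (pvConv d)
        = pvConv (l.foldl (fun d p => d.modify p.1 PySem.Dict.empty (fun g => g.insert p.2 ())) d) := by
    intro l
    induction l with
    | nil => intro d; rfl
    | cons p l ih => intro d; rw [List.foldl_cons, List.foldl_cons, pvConv_modify, ih]
  have h0 : (PySem.Dict.empty : PySem.Dict Int (PySem.Dict Int (Int × Int × Int)))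
      = pvConv PySem.Dict.empty := rfl
  rw [h0, h]

def pvW : List Char → Int
  | [] => 0
  | c :: cs => if '|' ∈ cs then (if c = '|' then 0 else 1) + pvW cs else 0

def pvV : List Char → Int
  | [] => 0
  | c :: cs => if c = '|' then (if '|' ∈ cs then pvW cs else 0) else pvV cs

theorem pv_fold1 (cs : List Char) : ∀ (c l : Int),
    (cs.foldl (fun v ch => pvStepC ch v) (c, l, 1)).1
      = c + (if '|' ∈ cs then l + pvW cs else 0) := by
  induction cs with
  | nil => intro c l; simp
  | cons ch cs ih =>
    intro c l
    rw [List.foldl_cons]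
    by_cases h : ch = '|'
    · subst h
      have hst : pvStepC '|' (c, l, 1) = (c + l, 0, 1) := by simp [pvStepC]
      rw [hst, ih]
      simp only [pvW, List.mem_cons]
      by_cases h2 : '|' ∈ cs <;> simp [h2] <;> ring
    · have hst : pvStepC ch (c, l, 1) = (c, l + 1, 1) := by simp [pvStepC, h]
      rw [hst, ih]
      simp only [pvW, List.mem_cons]
      by_cases h2 : '|' ∈ cs
      · rw [if_pos h2, if_pos (Or.inr h2), if_pos h2, if_neg h]; ring
      · rw [if_neg h2, if_neg (fun hor => Or.elim hor (fun he => h he.symm) h2)]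

theorem pv_fold0 (cs : List Char) : ∀ (c : Int),
    (cs.foldl (fun v ch => pvStepC ch v) (c, 0, 0)).1 = c + pvV cs := by
  induction cs with
  | nil => intro c; simp [pvV]
  | cons ch cs ih =>
    intro c
    rw [List.foldl_cons]
    by_cases h : ch = '|'
    · subst h
      have hst : pvStepC '|' (c, 0, 0) = (c, 0, 1) := by simp [pvStepC]
      rw [hst, pv_fold1]
      simp only [pvV, if_pos rfl]
      by_cases h2 : '|' ∈ cs <;> simp [h2]
    · have hst : pvStepC ch (c, 0, 0) = (c, 0, 0) := by simp [pvStepC, h]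
      rw [hst, ih]
      simp [pvV, h]

theorem pv_filt_en (s e : Int) : ∀ (cs : List Char) (k : Nat),
    ((PySem.List.enumerate cs (k : Int)).filter (fun p => decide (s ≤ p.1) && decide (p.1 < e))).map (fun p => p.2)
      = (cs.drop (s - k).toNat).take ((e - k).toNat - (s - k).toNat) := by
  intro cs
  induction cs with
  | nil => intro k; simp [PySem.List.enumerate]
  | cons ch cs ih =>
    intro k
    rw [PySem.List.enumerate_cons]
    have hk1 : ((k : Int) + 1) = ((k + 1 : Nat) : Int) := by push_cast; ring
    by_cases hs : s ≤ (k : Int)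
    · by_cases he : (k : Int) < e
      · have h1 : (s - k).toNat = 0 := by omega
        have h2 : (s - (k + 1 : Nat)).toNat = 0 := by push_cast; omega
        rw [List.filter_cons]
        simp only [hs, he, decide_true, Bool.and_self, if_true, List.map_cons, hk1, ih, h1, h2]
        have h3 : (e - k).toNat - 0 = ((e - (k+1:Nat)).toNat - 0) + 1 := by push_cast; omega
        rw [h3]
        simp [List.take_succ_cons]
      · -- k ≥ e : nothing more is kept; both sides are []
        have h1 : ((e - k).toNat - (s - k).toNat) = 0 := by omega
        have h2 : ((e - (k+1:Nat)).toNat - (s - (k+1:Nat)).toNat) = 0 := by push_cast; omega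
        rw [List.filter_cons]
        simp only [he, decide_false, Bool.and_false, Bool.false_eq_true, if_false]
        rw [hk1, ih, h2, h1]
        simp
    · have h1 : (s - k).toNat = (s - (k+1:Nat)).toNat + 1 := by push_cast; omega
      have h2 : ((e - k).toNat - (s - k).toNat) = ((e - (k+1:Nat)).toNat - (s - (k+1:Nat)).toNat) := by
        push_cast; omega
      rw [List.filter_cons]
      simp only [hs, decide_false, Bool.false_and, Bool.false_eq_true, if_false]
      rw [hk1, ih, h1, List.drop_succ_cons]
      congr 1
      omega

theorem pv_entry_fold (cs : List Char) (s e : Int) :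
    ((PySem.List.enumerate cs 0).foldl
        (fun v p => if s ≤ p.1 ∧ p.1 < e then pvStepC p.2 v else v) ((0, 0, 0) : Int × Int × Int)).1
      = pvV ((cs.drop s.toNat).take (e.toNat - s.toNat)) := by
  have hfun : (fun (v : Int × Int × Int) (p : Int × Char) => if s ≤ p.1 ∧ p.1 < e then pvStepC p.2 v else v)
      = (fun v p => if (decide (s ≤ p.1) && decide (p.1 < e)) = true then pvStepC p.2 v else v) := by
    funext v p
    by_cases h1 : s ≤ p.1 <;> by_cases h2 : p.1 < e <;> simp [h1, h2]
  rw [hfun, ← List.foldl_filter]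
  have hm : (List.filter (fun p => decide (s ≤ p.1) && decide (p.1 < e)) (PySem.List.enumerate cs 0)).foldl
        (fun v p => pvStepC p.2 v) ((0, 0, 0) : Int × Int × Int)
      = ((List.filter (fun p => decide (s ≤ p.1) && decide (p.1 < e)) (PySem.List.enumerate cs 0)).map
          (fun p => p.2)).foldl (fun v ch => pvStepC ch v) ((0, 0, 0) : Int × Int × Int) := by
    simp [List.foldl_map]
  rw [hm]
  have h0 : PySem.List.enumerate cs 0 = PySem.List.enumerate cs ((0 : Nat) : Int) := rfl
  rw [h0, pv_filt_en s e cs 0, pv_fold0]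
  norm_num

-- bar positions of cs, offset k
def pvBp : List Char → Int → List Int
  | [], _ => []
  | c :: cs, k => if c = '|' then k :: pvBp cs (k + 1) else pvBp cs (k + 1)

theorem pvBp_append (xs ys : List Char) : ∀ k : Int,
    pvBp (xs ++ ys) k = pvBp xs k ++ pvBp ys (k + xs.length) := by
  induction xs with
  | nil => intro k; simp [pvBp]
  | cons c xs ih =>
    intro k
    have harg : (k + 1) + ((xs.length : Nat) : Int) = k + (((c :: xs).length : Nat) : Int) := by
      push_cast [List.length_cons]; ring
    by_cases h : c = '|'
    · have hl : pvBp (c :: (xs ++ ys)) k = k :: pvBp (xs ++ ys) (k + 1) := by simp [pvBp, h]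
      have hr : pvBp (c :: xs) k = k :: pvBp xs (k + 1) := by simp [pvBp, h]
      rw [List.cons_append, hl, ih (k + 1), hr, List.cons_append, harg]
    · have hl : pvBp (c :: (xs ++ ys)) k = pvBp (xs ++ ys) (k + 1) := by simp [pvBp, h]
      have hr : pvBp (c :: xs) k = pvBp xs (k + 1) := by simp [pvBp, h]
      rw [List.cons_append, hl, ih (k + 1), hr, harg]

theorem pvBp_mem (cs : List Char) : ∀ (k : Int) (v : Int), v ∈ pvBp cs k → k ≤ v ∧ v < k + cs.length := by
  induction cs with
  | nil => intro k v hv; simp [pvBp] at hv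
  | cons c cs ih =>
    intro k v hv
    by_cases h : c = '|'
    · simp only [pvBp, h, if_true, List.mem_cons] at hv
      rcases hv with rfl | hv
      · simp only [List.length_cons]
        push_cast
        omega
      · have := ih (k + 1) v hv
        simp only [List.length_cons] at *
        push_cast at *
        omega
    · simp only [pvBp, h, if_false] at hv
      have := ih (k + 1) v hv
      simp only [List.length_cons] at *
      push_cast at *
      omega

theorem pvBp_sorted (cs : List Char) : ∀ k : Int, (pvBp cs k).Pairwise (· < ·) := by
  induction cs with
  | nil => intro k; simp [pvBp]
  | cons c cs ih =>
    intro k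
    by_cases h : c = '|' <;> simp [pvBp, h]
    · refine ⟨fun v hv => ?_, ih (k + 1)⟩
      have := pvBp_mem cs (k + 1) v hv
      omega
    · exact ih (k + 1)

-- the comprehension [i for i, ch in enumerate(text) if ch == '|'] is pvBp
theorem pvBars_eq (cs : List Char) : ∀ k : Nat,
    ((PySem.List.enumerate cs (k : Int)).filter (fun p => p.2 == '|')).map (fun p => p.1)
      = pvBp cs (k : Int) := by
  induction cs with
  | nil => intro k; simp [PySem.List.enumerate, pvBp]
  | cons c cs ih =>
    intro k
    rw [PySem.List.enumerate_cons, List.filter_cons]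
    have hk1 : ((k : Int) + 1) = ((k + 1 : Nat) : Int) := by push_cast; ring
    by_cases h : c = '|'
    · subst h
      simp only [beq_self_eq_true, if_true, decide_true]
      rw [List.map_cons, hk1, ih (k + 1)]
      have hbp : pvBp ('|' :: cs) (k : Int) = (k : Int) :: pvBp cs ((k : Int) + 1) := by simp [pvBp]
      rw [hbp, hk1]
    · have hb : (c == '|') = false := by simp [h]
      simp only [hb, Bool.false_eq_true, if_false]
      rw [hk1, ih (k + 1)]
      have hbp : pvBp (c :: cs) (k : Int) = pvBp cs ((k : Int) + 1) := by simp [pvBp, h]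
      rw [hbp, hk1]

theorem pvBp_nil_iff (cs : List Char) : ∀ k : Int, pvBp cs k = [] ↔ '|' ∉ cs := by
  induction cs with
  | nil => intro k; simp [pvBp]
  | cons c cs ih =>
    intro k
    by_cases h : c = '|' <;> simp [pvBp, h, ih (k + 1)]
    exact fun _ => Ne.symm h

theorem pvW_bp (cs : List Char) : ∀ k : Int, '|' ∈ cs →
    pvW cs = ((pvBp cs k).getLast?.getD 0 - k) - (((pvBp cs k).length : Int) - 1) := by
  induction cs with
  | nil => intro k h; simp at h
  | cons c cs ih =>
    intro k hmem
    by_cases h : c = '|'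
    · subst h
      by_cases h2 : '|' ∈ cs
      · have := ih (k + 1) h2
        have hne : pvBp cs (k + 1) ≠ [] := by
          rw [Ne, pvBp_nil_iff]; simp [h2]
        simp only [pvW, pvBp, if_pos rfl, h2, if_true]
        rcases hb : pvBp cs (k + 1) with _ | ⟨b, t⟩
        · exact absurd hb hne
        · rw [hb] at this
          rw [List.getLast?_cons_cons]
          simp only [this, List.length_cons]
          push_cast
          ring
      · have hnil : pvBp cs (k + 1) = [] := (pvBp_nil_iff cs (k + 1)).2 h2
        simp [pvW, pvBp, h2, hnil]
    · have h2 : '|' ∈ cs := by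
        rcases List.mem_cons.1 hmem with h' | h'
        · exact absurd h'.symm h
        · exact h'
      have := ih (k + 1) h2
      simp only [pvW, pvBp, h, if_false, h2, if_true]
      rw [this]
      ring

theorem pvV_bp (cs : List Char) : ∀ k : Int,
    pvV cs = if 2 ≤ (pvBp cs k).length then
        ((pvBp cs k).getLast?.getD 0 - (pvBp cs k).head?.getD 0) - (((pvBp cs k).length : Int) - 1)
      else 0 := by
  induction cs with
  | nil => intro k; simp [pvV, pvBp]
  | cons c cs ih =>
    intro k
    by_cases h : c = '|'
    · subst h
      by_cases h2 : '|' ∈ cs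
      · have hne : pvBp cs (k + 1) ≠ [] := by rw [Ne, pvBp_nil_iff]; simp [h2]
        have hlen : 1 ≤ (pvBp cs (k + 1)).length := List.length_pos_iff.2 hne
        simp only [pvV, if_pos rfl, h2, if_true, pvBp]
        rw [pvW_bp cs (k + 1) h2]
        have hcond : 2 ≤ (k :: pvBp cs (k + 1)).length := by simp; omega
        rw [if_pos hcond]
        rcases hb : pvBp cs (k + 1) with _ | ⟨b, t⟩
        · exact absurd hb hne
        · rw [hb] at *
          rw [List.getLast?_cons_cons]
          simp only [List.length_cons, List.head?_cons, Option.getD_some]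
          push_cast
          ring
      · have hnil : pvBp cs (k + 1) = [] := (pvBp_nil_iff cs (k + 1)).2 h2
        simp [pvV, pvBp, h2, hnil]
    · have hbp : pvBp (c :: cs) k = pvBp cs (k + 1) := by simp [pvBp, h]
      simp only [pvV, h, if_false]
      rw [hbp, ih (k + 1)]

theorem pvLBgo_spec (a : List Int) (x : Int) (hsorted : a.Pairwise (· < ·)) :
    ∀ (n lo hi : Nat), hi - lo ≤ n → lo ≤ hi → hi ≤ a.length →
      (∀ i (h : i < a.length), i < lo → a[i] < x) →
      (∀ i (h : i < a.length), hi ≤ i → ¬ a[i] < x) →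
      pvLBgo a x lo hi = a.countP (fun v => decide (v < x)) := by
  intro n
  induction n with
  | zero =>
    intro lo hi hn hlh hha hlt hge
    have he : lo = hi := by omega
    subst he
    rw [pvLBgo, dif_neg (by omega)]
    -- countP a = lo : the first lo entries satisfy the test, the rest do not
    have hsplit : a = a.take lo ++ a.drop lo := (List.take_append_drop lo a).symm
    rw [hsplit, List.countP_append]
    have h1 : (a.take lo).countP (fun v => decide (v < x)) = (a.take lo).length := by
      rw [List.countP_eq_length]
      intro v hv
      rw [List.mem_take_iff_getElem] at hv
      obtain ⟨i, hi, rfl⟩ := hv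
      have h4 : i < lo := by omega
      have h6 : i < a.length := by simp at hi; omega
      simp only [List.getElem_take, decide_eq_true_eq]
      exact hlt i h6 h4
    have h2 : (a.drop lo).countP (fun v => decide (v < x)) = 0 := by
      rw [List.countP_eq_zero]
      intro v hv
      rw [List.mem_iff_getElem] at hv
      obtain ⟨i, hi, rfl⟩ := hv
      rw [List.getElem_drop]
      simp only [List.length_drop] at hi
      simp [hge (lo + i) (by omega) (by omega)]
    rw [h1, h2, List.length_take]
    omega
  | succ n ih =>
    intro lo hi hn hlh hha hlt hge
    by_cases hlt2 : lo < hi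
    · rw [pvLBgo, dif_pos hlt2]
      have hmidlt : (lo + hi) / 2 < a.length := by omega
      have hget : PySem.List.pyGetD a (((lo + hi) / 2 : Nat) : Int) 0 = a[(lo + hi) / 2] := by
        rw [PySem.List.pyGetD_natCast]
        exact List.getD_eq_getElem a 0 hmidlt
      have hpair := List.pairwise_iff_getElem.1 hsorted
      simp only
      rw [hget]
      by_cases hc : a[(lo + hi) / 2] < x
      · rw [if_pos hc]
        apply ih _ hi (by omega) (by omega) hha _ hge
        intro i h hi2
        rcases Nat.lt_or_ge i ((lo + hi) / 2) with h3 | h3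
        · exact lt_trans (hpair i ((lo + hi) / 2) h hmidlt h3) hc
        · have : i = (lo + hi) / 2 := by omega
          subst this
          exact hc
      · rw [if_neg hc]
        apply ih lo _ (by omega) (by omega) (by omega) hlt
        intro i h hi2
        rcases Nat.lt_or_ge ((lo + hi) / 2) i with h3 | h3
        · intro hlt3
          exact hc (lt_trans (hpair ((lo + hi) / 2) i hmidlt h h3) hlt3)
        · have : i = (lo + hi) / 2 := by omega
          subst this
          exact hc
    · have he : lo = hi := by omega
      subst he
      exact ih lo lo (by omega) (by omega) hha hlt hge

theorem pvLowerBound_eq (a : List Int) (x : Int) (hsorted : a.Pairwise (· < ·)) :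
    pvLowerBound a x = ((a.countP (fun v => decide (v < x)) : Nat) : Int) := by
  unfold pvLowerBound
  congr 1
  exact pvLBgo_spec a x hsorted a.length 0 a.length (by omega) (by omega) (le_refl _)
    (fun i h hi => absurd hi (Nat.not_lt_zero i)) (fun i h hi => absurd h (by omega))

theorem pv_entry_formula (cs : List Char) (s e : Int) :
    pvV ((cs.drop s.toNat).take (e.toNat - s.toNat)) =
      (if pvLowerBound (pvBp cs 0) s < pvLowerBound (pvBp cs 0) e - 1 then
        (PySem.List.pyGetD (pvBp cs 0) (pvLowerBound (pvBp cs 0) e - 1) 0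
          - PySem.List.pyGetD (pvBp cs 0) (pvLowerBound (pvBp cs 0) s) 0)
          - ((pvLowerBound (pvBp cs 0) e - 1) - pvLowerBound (pvBp cs 0) s)
      else 0) := by
  have hsorted := pvBp_sorted cs 0
  rw [pvLowerBound_eq _ s hsorted, pvLowerBound_eq _ e hsorted]
  set a := s.toNat with ha
  set n := cs.length with hn
  set t := e.toNat - a with ht
  set w := (cs.drop a).take t with hw
  have hlenw : w.length = min t (n - a) := by
    rw [hw, List.length_take, List.length_drop]
  -- decomposition of the bar list
  have hdec : cs = cs.take a ++ (w ++ (cs.drop a).drop t) := by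
    rw [hw, List.take_append_drop, List.take_append_drop]
  have hlen1 : (cs.take a).length = min a n := by
    rw [List.length_take]
  have hbp : pvBp cs 0 = pvBp (cs.take a) 0
      ++ (pvBp w (min a n : Nat) ++ pvBp ((cs.drop a).drop t) ((min a n : Nat) + w.length)) := by
    conv_lhs => rw [hdec]
    rw [pvBp_append, pvBp_append, hlen1]
    norm_num
  set P1 := pvBp (cs.take a) 0 with hP1
  set P2 := pvBp w ((min a n : Nat) : Int) with hP2
  set P3 := pvBp ((cs.drop a).drop t) (((min a n : Nat) : Int) + w.length) with hP3
  have hlenrest : ((cs.drop a).drop t).length = n - a - t := by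
    rw [List.length_drop, List.length_drop]
  have hm1 : ∀ v ∈ P1, 0 ≤ v ∧ v < (min a n : Nat) := by
    intro v hv
    have := pvBp_mem _ _ v hv
    rw [hlen1] at this
    omega
  have hm2 : ∀ v ∈ P2, ((min a n : Nat) : Int) ≤ v ∧ v < ((min a n : Nat) : Int) + w.length := by
    intro v hv
    exact pvBp_mem _ _ v hv
  have hm3 : ∀ v ∈ P3, ((min a n : Nat) : Int) + w.length ≤ v
      ∧ v < ((min a n : Nat) : Int) + w.length + (n - a - t : Nat) := by
    intro v hv
    have := pvBp_mem _ _ v hv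
    rw [hlenrest] at this
    exact this
  by_cases hcase : a < e.toNat
  · -- the window is genuinely s ≤ i < e with e > 0
    have hc1 : (pvBp cs 0).countP (fun v => decide (v < s)) = P1.length := by
      rw [hbp, List.countP_append, List.countP_append]
      have e1 : P1.countP (fun v => decide (v < s)) = P1.length :=
        List.countP_eq_length.2 (fun v hv => by have := hm1 v hv; simp; omega)
      have e2 : P2.countP (fun v => decide (v < s)) = 0 :=
        List.countP_eq_zero.2 (fun v hv => by have := hm2 v hv; simp; omega)
      have e3 : P3.countP (fun v => decide (v < s)) = 0 :=
        List.countP_eq_zero.2 (fun v hv => by have := hm3 v hv; have h2 := hlenw; simp; omega)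
      rw [e1, e2, e3]
      omega
    have hc2 : (pvBp cs 0).countP (fun v => decide (v < e)) = P1.length + P2.length := by
      rw [hbp, List.countP_append, List.countP_append]
      have e1 : P1.countP (fun v => decide (v < e)) = P1.length :=
        List.countP_eq_length.2 (fun v hv => by have := hm1 v hv; simp; omega)
      have e2 : P2.countP (fun v => decide (v < e)) = P2.length :=
        List.countP_eq_length.2 (fun v hv => by have := hm2 v hv; have h2 := hlenw; simp; omega)
      have e3 : P3.countP (fun v => decide (v < e)) = 0 :=
        List.countP_eq_zero.2 (fun v hv => by have := hm3 v hv; have h2 := hlenw; simp; omega)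
      rw [e1, e2, e3]
      omega
    rw [hc1, hc2]
    rw [pvV_bp w (((min a n : Nat) : Int))]
    rw [← hP2]
    by_cases h2 : 2 ≤ P2.length
    · rw [if_pos h2, if_pos (by push_cast; omega)]
      -- index the concatenation
      have hidx1 : PySem.List.pyGetD (pvBp cs 0) ((P1.length : Int)) 0 = P2.head?.getD 0 := by
        rw [PySem.List.pyGetD_natCast, hbp]
        rw [List.getD, List.getElem?_append_right (by omega)]
        simp only [Nat.sub_self]
        rw [List.getElem?_append_left (by omega)]
        cases hp : P2 with
        | nil => simp [hp] at h2
        | cons b tl => simp [hp]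
      have hidx2 : ((P1.length + P2.length : Nat) : Int) - 1 = ((P1.length + (P2.length - 1) : Nat) : Int) := by
        push_cast
        omega
      have hidx3 : PySem.List.pyGetD (pvBp cs 0) (((P1.length + (P2.length - 1) : Nat) : Int)) 0
          = P2.getLast?.getD 0 := by
        rw [PySem.List.pyGetD_natCast, hbp]
        rw [List.getD, List.getElem?_append_right (by omega)]
        have : P1.length + (P2.length - 1) - P1.length = P2.length - 1 := by omega
        rw [this]
        rw [List.getElem?_append_left (by omega)]
        rw [List.getLast?_eq_getElem?]
      rw [hidx2, hidx1, hidx3]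
      have hlc : (((P1.length + (P2.length - 1) : Nat)) : Int) - (P1.length : Int) = (P2.length : Int) - 1 := by omega
      rw [hlc]
    · rw [if_neg h2, if_neg (by push_cast; omega)]
  · -- empty window: e.toNat ≤ a, both sides are 0
    have hwnil : w = [] := by
      rw [hw]
      have : t = 0 := by omega
      rw [this, List.take_zero]
    have hvnil : pvV ((cs.drop a).take t) = 0 := by
      rw [← hw, hwnil]
      rfl
    rw [hvnil]
    have hmono : (pvBp cs 0).countP (fun v => decide (v < e)) ≤ (pvBp cs 0).countP (fun v => decide (v < s)) := by
      apply List.countP_mono_left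
      intro v hv
      have h1 := pvBp_mem cs 0 v hv
      simp only [decide_eq_true_eq]
      omega
    rw [if_neg (by omega)]

theorem pv_foldl_ext {α β : Type} (f g : α → β → α) (l : List β) (init : α)
    (h : ∀ a b, f a b = g a b) : l.foldl f init = l.foldl g init := by
  induction l generalizing init with
  | nil => rfl
  | cons b l ih => rw [List.foldl_cons, List.foldl_cons, h, ih]

-- assembly
theorem contained_items_v2_eq (text : String) (indices : List (Int × Int)) :
    contained_items_v2 text indices = contained_items_v2_alt text indices := by
  unfold contained_items_v2 contained_items_v2_alt
  have hbars : ((PySem.List.enumerate text.toList 0).filter (fun p => p.2 == '|')).map (fun p => p.1)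
      = pvBp text.toList 0 := by
    have := pvBars_eq text.toList 0
    norm_num at this
    exact this
  rw [hbars, pvBuildA_eq, pv_dfinal]
  simp only [pvConv, pvConvI, List.map_map, List.foldl_map, Function.comp_def]
  congr 1
  apply congrArg
  apply pv_foldl_ext
  intro r q
  try rw [List.foldl_map]
  apply pv_foldl_ext
  intro r' p
  congr 1
  rw [pv_entry_fold, pv_entry_formula]

-- ===== VERDICT (by name: the statement is the Claim_ definition above) =====
theorem contained_items_v2_spec : Claim_equal_contained_items_v2 := by
  intro text indices _
  exact contained_items_v2_eq text indices
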